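-- pv_equiv track=rewrite | github.com/liftnhoff/advent-of-code | 2018/day2/part2.py | find_common_letters
-- ===== SOURCE A (Python) =====
-- def find_common_letters(first_id, second_id):
--     if len(first_id) != len(second_id):
--         raise RuntimeError('ID strings must be the same length.')
--
--     common_letters = []
--     diff_count = 0
--     for index in range(len(first_id)):
--         if first_id[index] == second_id[index]:
--             common_letters.append(first_id[index])
--         else:
--             diff_count += 1
--
--         if diff_count >= 2:
--             return ''
--
--     if diff_count == 0:
--         return ''
--     else:
--         return ''.join(common_letters)
-- ===== SOURCE B (Python) =====
-- def find_common_letters(first_id, second_id):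
--     if len(first_id) != len(second_id):
--         raise RuntimeError('ID strings must be the same length.')
--
--     diffs = [i for i in range(len(first_id)) if first_id[i] != second_id[i]]
--     if len(diffs) == 1:
--         i = diffs[0]
--         return first_id[:i] + first_id[i + 1:]
--     return ''
-- ===== Notes on version B (the rewrite author's own statement) =====
-- stated objective: simpler
-- what changed: Replaces A's single interleaved loop that accumulates matching chars and counts mismatches with early exit by a two-phase structure: collect the mismatch indices, then if there is exactly one, rebuild the answer by slicing around it.
import Mathlib
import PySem

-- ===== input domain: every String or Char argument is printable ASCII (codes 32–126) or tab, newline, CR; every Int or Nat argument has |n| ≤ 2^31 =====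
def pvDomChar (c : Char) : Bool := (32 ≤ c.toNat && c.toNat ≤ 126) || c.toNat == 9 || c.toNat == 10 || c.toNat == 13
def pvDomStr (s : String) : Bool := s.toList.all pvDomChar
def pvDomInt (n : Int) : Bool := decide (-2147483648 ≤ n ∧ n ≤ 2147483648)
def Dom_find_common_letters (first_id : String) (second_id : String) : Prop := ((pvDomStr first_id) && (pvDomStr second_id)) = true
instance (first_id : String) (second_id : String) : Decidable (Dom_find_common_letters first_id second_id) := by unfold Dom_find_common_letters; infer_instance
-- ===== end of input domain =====

-- B replaces A's interleaved accumulate-and-count loop by a two-phase "collect mismatch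
-- indices, then slice around the single one" decomposition (objective: simpler).


-- ===== PORT A =====
-- A's loop over `range(len(first_id))`, indexing both strings at the same position, ported as
-- simultaneous structural recursion on the two character lists (lengths are equal under Pre_):
-- `acc` is `common_letters`, `dc` is `diff_count`, branches and the `>= 2` early return in order.
def pvGoA : List Char → List Char → List Char → Int → String
  | [], [], acc, dc => if dc = 0 then "" else String.mk acc
  | a :: as_, b :: bs, acc, dc =>
      if a = b then
        if dc ≥ 2 then "" else pvGoA as_ bs (acc ++ [a]) dc
      else
        if dc + 1 ≥ 2 then "" else pvGoA as_ bs acc (dc + 1)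
  | _, _, _, _ => ""  -- unreachable under Pre_ (equal lengths)

def find_common_letters (first_id : String) (second_id : String) : String :=
  if first_id.toList.length ≠ second_id.toList.length then ""  -- Python raises RuntimeError here; excluded by Pre_
  else pvGoA first_id.toList second_id.toList [] 0

-- ===== PORT B =====
def find_common_letters_alt (first_id : String) (second_id : String) : String :=
  let l1 := first_id.toList
  let l2 := second_id.toList
  if l1.length ≠ l2.length then ""  -- Source B raises RuntimeError here; excluded by Pre_
  else
    let diffs := (List.range l1.length).filter (fun i => l1.getD i ' ' ≠ l2.getD i ' ')
    if diffs.length = 1 then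
      let i := diffs.headD 0
      String.mk (l1.take i ++ l1.drop (i + 1))
    else ""

-- ===== PRECONDITION & SPEC =====
-- Pre_ excludes exactly the inputs of unequal length, on which A raises RuntimeError.
def Pre_find_common_letters (first_id : String) (second_id : String) : Prop :=
  first_id.toList.length = second_id.toList.length
instance (first_id : String) (second_id : String) : Decidable (Pre_find_common_letters first_id second_id) := by unfold Pre_find_common_letters; infer_instance
def pvWitness_find_common_letters : String × String := ("abcde", "abxde")
def Spec_find_common_letters (first_id : String) (second_id : String) (out : String) : Prop := out = find_common_letters_alt first_id second_id
instance (first_id : String) (second_id : String) (out : String) : Decidable (Spec_find_common_letters first_id second_id out) := by unfold Spec_find_common_letters; infer_instance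

-- ===== CLAIM (what is proved, stated in full; the proofs are below) =====
def Claim_equal_find_common_letters : Prop := ∀ (first_id : String) (second_id : String), Dom_find_common_letters first_id second_id → Pre_find_common_letters first_id second_id → Spec_find_common_letters first_id second_id (find_common_letters first_id second_id)

-- ===== LEMMAS AND PROOFS =====

-- the list of positions where the two (equal-length) lists differ
def pvDiffIdx : List Char → List Char → List Nat
  | [], _ => []
  | _, [] => []
  | a :: as_, b :: bs =>
      if a = b then (pvDiffIdx as_ bs).map Nat.succ
      else 0 :: (pvDiffIdx as_ bs).map Nat.succ

theorem pvDiffIdx_nil_iff : ∀ (xs ys : List Char), xs.length = ys.length →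
    (pvDiffIdx xs ys = [] ↔ xs = ys) := by
  intro xs
  induction xs with
  | nil => intro ys h; cases ys <;> simp [pvDiffIdx] at h ⊢
  | cons a as_ ih =>
      intro ys h
      cases ys with
      | nil => simp at h
      | cons b bs =>
          simp at h
          by_cases hab : a = b <;> simp [pvDiffIdx, hab, ih bs h]

theorem pvFilter_range_eq_diffIdx : ∀ (xs ys : List Char), xs.length = ys.length →
    (List.range xs.length).filter (fun i => xs.getD i ' ' ≠ ys.getD i ' ') = pvDiffIdx xs ys := by
  intro xs
  induction xs with
  | nil => intro ys h; simp [pvDiffIdx]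
  | cons a as_ ih =>
      intro ys h
      cases ys with
      | nil => simp at h
      | cons b bs =>
          simp at h
          rw [List.length_cons, List.range_succ_eq_map]
          by_cases hab : a = b <;>
            · simp [pvDiffIdx, hab, List.filter_map, Function.comp_def, ← ih bs h]
              try rfl

-- A's loop after the first mismatch: it appends every remaining char while they agree,
-- and bails out to "" on a second mismatch.
theorem pvGoA_one : ∀ (xs ys : List Char) (acc : List Char), xs.length = ys.length →
    pvGoA xs ys acc 1 = if xs = ys then String.mk (acc ++ xs) else "" := by
  intro xs
  induction xs with
  | nil => intro ys acc h; cases ys <;> simp_all [pvGoA]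
  | cons a as_ ih =>
      intro ys acc h
      cases ys with
      | nil => simp at h
      | cons b bs =>
          simp at h
          by_cases hab : a = b
          · subst hab
            rw [show pvGoA (a :: as_) (a :: bs) acc 1 = pvGoA as_ bs (acc ++ [a]) 1 from by
              simp [pvGoA]]
            rw [ih bs (acc ++ [a]) h]
            by_cases hr : as_ = bs <;> simp [hr]
          · simp [pvGoA, hab]

-- A's loop with no mismatch seen yet, characterised by the mismatch positions.
theorem pvGoA_zero : ∀ (xs ys : List Char) (acc : List Char), xs.length = ys.length →
    pvGoA xs ys acc 0 =
      match pvDiffIdx xs ys with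
      | [] => ""
      | [i] => String.mk (acc ++ (xs.take i ++ xs.drop (i + 1)))
      | _ => "" := by
  intro xs
  induction xs with
  | nil => intro ys acc h; cases ys <;> simp_all [pvGoA, pvDiffIdx]
  | cons a as_ ih =>
      intro ys acc h
      cases ys with
      | nil => simp at h
      | cons b bs =>
          simp at h
          by_cases hab : a = b
          · simp only [pvDiffIdx, if_pos hab]
            have step : pvGoA (a :: as_) (b :: bs) acc 0 = pvGoA as_ bs (acc ++ [a]) 0 := by
              simp [pvGoA, hab]
            rw [step, ih bs (acc ++ [a]) h]
            cases hd : pvDiffIdx as_ bs with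
            | nil => simp
            | cons i t =>
                cases t with
                | nil => simp [List.take_succ_cons, List.drop_succ_cons]
                | cons j u => simp
          · simp only [pvDiffIdx, if_neg hab]
            have step : pvGoA (a :: as_) (b :: bs) acc 0 = pvGoA as_ bs acc 1 := by
              simp [pvGoA, hab]
            rw [step, pvGoA_one as_ bs acc h]
            by_cases hr : as_ = bs
            · rw [if_pos hr, (pvDiffIdx_nil_iff as_ bs h).2 hr]
              simp
            · rw [if_neg hr]
              cases hd : pvDiffIdx as_ bs with
              | nil => exact absurd ((pvDiffIdx_nil_iff as_ bs h).1 hd) hr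
              | cons i t => simp

-- ===== VERDICT (by name: the statement is the Claim_ definition above) =====
theorem find_common_letters_spec : Claim_equal_find_common_letters := by
  intro f s _ hpre
  have hlen : f.toList.length = s.toList.length := hpre
  show find_common_letters f s = find_common_letters_alt f s
  simp only [find_common_letters, find_common_letters_alt]
  rw [if_neg (not_not_intro hlen), if_neg (not_not_intro hlen)]
  rw [pvFilter_range_eq_diffIdx f.toList s.toList hlen,
    pvGoA_zero f.toList s.toList [] hlen]
  cases hd : pvDiffIdx f.toList s.toList with
  | nil => simp
  | cons i t =>
      cases t with
      | nil => simp
      | cons j u => simp
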